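-- pv_equiv track=rewrite | github.com/radam9/codewars | Simple Fun #358: Vertical Histogram Of Letters.py | vertical_histogram_of
-- ===== SOURCE A (Python) =====
-- from string import ascii_uppercase as abc
--
-- def vertical_histogram_of(string):
--     counter = {}
--     for letter in string:
--         if letter not in abc or letter in counter:
--             continue
--         counter[letter] = string.count(letter)
--     keys = sorted(list(key for key in counter))
--     max_count = counter[max(counter, key=counter.get)] if counter else 0
--     output = ""
--     values = [counter[key] for key in keys]
--     for i in range(max_count):
--         line = " ".join(["*" if value > 0 else " " for value in values])
--         output = f"{line.rstrip(' ')}\n" + output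
--         values = [value - 1 for value in values]
--     return f"{output}{' '.join(keys)}"
-- ===== SOURCE B (Python) =====
-- def vertical_histogram_of(string):
--     letters = sorted(ch for ch in string if 'A' <= ch <= 'Z')
--     keys, counts = [], []
--     for ch in letters:
--         if keys and keys[-1] == ch:
--             counts[-1] += 1
--         else:
--             keys.append(ch)
--             counts.append(1)
--     m = max(counts, default=0)
--     cols = [' ' * (m - c) + '*' * c for c in counts]
--     rows = [' '.join(row).rstrip(' ') for row in zip(*cols)]
--     return '\n'.join(rows + [' '.join(keys)])
-- ===== Notes on version B (the rewrite author's own statement) =====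
-- stated objective: alternative
-- what changed: B drops the dict entirely: it sorts the uppercase letters, groups consecutive runs into (keys, counts) in one scan, renders one vertical COLUMN per key (spaces then stars) and transposes the columns into rows with zip(*cols), instead of A's counter dict plus bottom-up row loop that decrements a shared values list.
import Mathlib
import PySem

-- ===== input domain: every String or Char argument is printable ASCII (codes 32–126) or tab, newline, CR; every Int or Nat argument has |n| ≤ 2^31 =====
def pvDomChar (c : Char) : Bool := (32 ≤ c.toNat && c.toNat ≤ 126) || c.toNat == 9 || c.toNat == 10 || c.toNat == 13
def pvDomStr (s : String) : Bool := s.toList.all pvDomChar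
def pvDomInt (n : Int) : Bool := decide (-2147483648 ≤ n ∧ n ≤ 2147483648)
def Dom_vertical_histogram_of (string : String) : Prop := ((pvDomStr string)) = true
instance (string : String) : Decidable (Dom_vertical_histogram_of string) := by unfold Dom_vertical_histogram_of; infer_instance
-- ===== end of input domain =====

-- B avoids the dict entirely: it sorts the uppercase letters, groups consecutive runs into
-- (keys, counts), renders one COLUMN per key and transposes the columns into rows (zip);
-- objective: alternative algorithm (sort-and-group + transpose vs dict counting + row loop).

-- ===== PORT A =====
-- string.ascii_uppercase
def pvAbc : List Char :=
  ['A','B','C','D','E','F','G','H','I','J','K','L','M',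
   'N','O','P','Q','R','S','T','U','V','W','X','Y','Z']

-- exact port of str.rstrip(' '): remove trailing ' ' characters
def pvRstripSp (cs : List Char) : List Char := (cs.reverse.dropWhile (fun c => c == ' ')).reverse

def vertical_histogram_of (string : String) : String :=
  let cs := string.toList
  let counter : PySem.Dict Char Int := cs.foldl
    (fun d letter =>
      if letter ∉ pvAbc ∨ d.contains letter then d
      else d.insert letter (cs.count letter : Int))   -- string.count(letter), single-char needle
    PySem.Dict.empty
  let keys := PySem.List.sorted counter.keys (fun k => k) false
  let max_count : Int :=
    match PySem.List.max? counter.keys (fun k => counter.getD k 0) with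
    | some k => counter.getD k 0   -- counter[max(...)]: that key is always present, getD is exact
    | none => 0
  let values := keys.map (fun k => counter.getD k 0)  -- keys come from counter, getD is exact
  let res := (PySem.List.pyRange 0 max_count 1).foldl
    (fun (st : List Char × List Int) _i =>
      let line := PySem.Chars.join [' '] (st.2.map (fun v => if v > 0 then ['*'] else [' ']))
      (pvRstripSp line ++ '\n' :: st.1, st.2.map (fun v => v - 1)))
    ([], values)
  String.ofList (res.1 ++ PySem.Chars.join [' '] (keys.map (fun k => [k])))

-- ===== PORT B =====
-- counts[-1] += 1 : increment the last element of the list (B only reaches it on non-empty counts)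
def pvIncLast (l : List Int) : List Int :=
  match l with
  | [] => []
  | [x] => [x + 1]
  | x :: t => x :: pvIncLast t

-- exact port of zip(*cols): stop at the first exhausted column; zip of no columns is empty
def pvZip (cols : List (List Char)) : List (List Char) :=
  if cols.isEmpty || cols.any (fun l => l.isEmpty) then []
  else cols.map (fun l => l.headD ' ') :: pvZip (cols.map (fun l => l.tail))
termination_by (cols.headD []).length
decreasing_by
  rename_i h
  simp only [Bool.or_eq_true, List.isEmpty_iff, List.any_eq_true, not_or, not_exists, not_and] at h
  cases cols with
  | nil => exact absurd rfl h.1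
  | cons c t =>
    have hc : c ≠ [] := by
      intro hnil
      exact h.2 c (by simp) (by simp [hnil])
    simp only [List.headD_cons]
    cases c with
    | nil => exact absurd rfl hc
    | cons a b => simp

def vertical_histogram_of_alt (string : String) : String :=
  let letters := PySem.List.sorted
    (string.toList.filter (fun ch => decide ('A' ≤ ch ∧ ch ≤ 'Z'))) (fun c => c) false
  let g := letters.foldl
    (fun (st : List Char × List Int) ch =>
      if st.1 ≠ [] ∧ st.1.getLast? = some ch
      then (st.1, pvIncLast st.2)
      else (st.1 ++ [ch], st.2 ++ [1]))
    ([], [])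
  let m : Int := PySem.List.maxD g.2 (fun v => v) 0
  let cols := g.2.map (fun c =>
    PySem.List.pyRepeat [' '] (m - c) ++ PySem.List.pyRepeat ['*'] c)
  let rows := (pvZip cols).map (fun row =>
    pvRstripSp (PySem.Chars.join [' '] (row.map (fun c => [c]))))
  String.ofList (PySem.Chars.join ['\n']
    (rows ++ [PySem.Chars.join [' '] (g.1.map (fun k => [k]))]))

-- ===== PRECONDITION & SPEC =====
def Spec_vertical_histogram_of (string : String) (out : String) : Prop := out = vertical_histogram_of_alt string
instance (string : String) (out : String) : Decidable (Spec_vertical_histogram_of string out) := by unfold Spec_vertical_histogram_of; infer_instance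

-- ===== CLAIM (what is proved, stated in full; the proofs are below) =====
def Claim_equal_vertical_histogram_of : Prop := ∀ (string : String), Dom_vertical_histogram_of string → Spec_vertical_histogram_of string (vertical_histogram_of string)

-- ===== LEMMAS AND PROOFS =====
theorem pv_mem_abc_iff (c : Char) : c ∈ pvAbc ↔ ('A' ≤ c ∧ c ≤ 'Z') := by
  simp [pvAbc, Char.ext_iff, Char.le_def, UInt32.le_iff_toNat_le, UInt32.ext_iff]
  omega

-- spec dict as a function of the processed prefix
def pvSpecItems (cs q : List Char) : List (Char × Int) :=
  (PySem.Set.ofList (q.filter (fun c => decide (c ∈ pvAbc)))).map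
    (fun k => (k, (cs.count k : Int)))

theorem pv_specItems_snoc (cs q : List Char) (c : Char) :
    pvSpecItems cs (q ++ [c]) =
      if c ∈ pvAbc ∧ c ∉ PySem.Set.ofList (q.filter (fun x => decide (x ∈ pvAbc)))
      then pvSpecItems cs q ++ [(c, (cs.count c : Int))] else pvSpecItems cs q := by
  unfold pvSpecItems
  rw [List.filter_append]
  by_cases hc : c ∈ pvAbc
  · simp only [List.filter_cons, List.filter_nil, hc, decide_true, if_true]
    rw [PySem.Set.ofList_eq_foldl, List.foldl_append]
    rw [← PySem.Set.ofList_eq_foldl]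
    simp only [List.foldl_cons, List.foldl_nil]
    unfold PySem.Set.add
    by_cases hm : c ∈ PySem.Set.ofList (List.filter (fun x => decide (x ∈ pvAbc)) q)
    · simp [PySem.Set.contains, hm]
    · simp [PySem.Set.contains, hm]
  · simp [hc]

theorem pv_foldA (cs : List Char) (l : List Char) : ∀ (p : List Char),
    l.foldl
      (fun d letter =>
        if letter ∉ pvAbc ∨ d.contains letter then d
        else d.insert letter (cs.count letter : Int))
      (PySem.Dict.mk (pvSpecItems cs p)) = PySem.Dict.mk (pvSpecItems cs (p ++ l)) := by
  induction l with
  | nil => intro p; simp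
  | cons c t ih =>
    intro p
    simp only [List.foldl_cons]
    have hstep :
        (if c ∉ pvAbc ∨ (PySem.Dict.mk (pvSpecItems cs p)).contains c then PySem.Dict.mk (pvSpecItems cs p)
         else (PySem.Dict.mk (pvSpecItems cs p)).insert c (cs.count c : Int))
        = PySem.Dict.mk (pvSpecItems cs (p ++ [c])) := by
      have hcont : (PySem.Dict.mk (pvSpecItems cs p)).contains c
          = decide (c ∈ PySem.Set.ofList (p.filter (fun x => decide (x ∈ pvAbc)))) := by
        rw [PySem.Dict.contains_mk]
        unfold pvSpecItems
        simp only [List.any_map, Function.comp_def]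
        simp [List.any_beq', List.contains_eq_mem]
      rw [pv_specItems_snoc]
      by_cases hc : c ∈ pvAbc
      · by_cases hm : c ∈ PySem.Set.ofList (p.filter (fun x => decide (x ∈ pvAbc)))
        · simp [hc, hm, hcont]
        · rw [if_neg (by simp [hc, hm, hcont]), if_pos ⟨hc, hm⟩]
          apply PySem.Dict.ext
          rw [PySem.Dict.items_insert_of_not_contains _ _ (by simp [hcont, hm])]
      · simp [hc]
    rw [hstep]
    simpa using ih (p ++ [c])

theorem pv_dictA (cs : List Char) :
    cs.foldl
      (fun d letter =>
        if letter ∉ pvAbc ∨ d.contains letter then d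
        else d.insert letter (cs.count letter : Int))
      PySem.Dict.empty = PySem.Dict.mk (pvSpecItems cs cs) := by
  exact pv_foldA cs cs []

-- the spec dict IS Counter(filtered string)
theorem pv_dict_eq_counter (cs : List Char) :
    PySem.Dict.mk (pvSpecItems cs cs)
    = PySem.Dict.counter (cs.filter (fun c => decide (c ∈ pvAbc))) := by
  apply PySem.Dict.ext
  show pvSpecItems cs cs = _
  rw [PySem.Dict.items_counter]
  unfold pvSpecItems
  apply List.map_congr_left
  intro k hk
  have hk' : k ∈ cs.filter (fun c => decide (c ∈ pvAbc)) := (PySem.Set.mem_ofList _ _).1 hk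
  have hp : decide (k ∈ pvAbc) = true := (List.mem_filter.1 hk').2
  rw [List.count_filter (p := fun c => decide (c ∈ pvAbc)) hp]

theorem pv_max_eq (d : PySem.Dict Char Int) (h : d.keys.Nodup) :
    (match PySem.List.max? d.keys (fun k => d.getD k 0) with
     | some k => d.getD k 0
     | none => 0)
    = PySem.List.maxD d.values (fun v => v) 0 := by
  rw [PySem.Dict.values_eq_map_keys d h 0]
  cases hA : PySem.List.max? d.keys (fun k => d.getD k 0) with
  | none =>
    have : d.keys = [] := (PySem.List.max?_eq_none_iff _ _).1 hA
    simp [this, PySem.List.maxD, PySem.List.max?]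
  | some k =>
    have hkmem : k ∈ d.keys := PySem.List.max?_mem hA
    have hne : d.keys.map (fun k => d.getD k 0) ≠ [] := by
      intro h0
      rw [List.map_eq_nil_iff] at h0
      rw [h0] at hkmem
      simp at hkmem
    cases hB : PySem.List.max? (d.keys.map (fun k => d.getD k 0)) (fun v => v) with
    | none => exact absurd ((PySem.List.max?_eq_none_iff _ _).1 hB) hne
    | some v =>
      simp only [PySem.List.maxD, hB, Option.getD_some]
      have hv : v ∈ d.keys.map (fun k => d.getD k 0) := PySem.List.max?_mem hB
      obtain ⟨k', hk', rfl⟩ := List.mem_map.1 hv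
      apply le_antisymm
      · exact PySem.List.max?_isMax hB _ (List.mem_map_of_mem hkmem)
      · exact PySem.List.max?_isMax hA k' hk'

def pvRowLine (vs : List Int) : List Char :=
  pvRstripSp (PySem.Chars.join [' '] (vs.map (fun v => if v > 0 then ['*'] else [' '])))

def pvRowsRev : Nat → List Int → List Char
  | 0, _ => []
  | n+1, vs => pvRowsRev n (vs.map (fun v => v - 1)) ++ (pvRowLine vs ++ ['\n'])

theorem pv_fold_rows (l : List Int) : ∀ (vs : List Int) (acc : List Char),
    l.foldl (fun (st : List Char × List Int) _i =>
        (pvRstripSp (PySem.Chars.join [' '] (st.2.map (fun v => if v > 0 then ['*'] else [' ']))) ++ '\n' :: st.1,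
         st.2.map (fun v => v - 1))) (acc, vs)
    = (pvRowsRev l.length vs ++ acc, vs.map (fun v => v - (l.length : Int))) := by
  induction l with
  | nil => intro vs acc; simp [pvRowsRev]
  | cons x t ih =>
    intro vs acc
    simp only [List.foldl_cons]
    rw [ih]
    simp only [Prod.mk.injEq]
    refine ⟨by simp [pvRowsRev, pvRowLine, List.append_assoc], ?_⟩
    rw [List.map_map]
    apply List.map_congr_left
    intro v _
    simp only [Function.comp_apply, List.length_cons]
    push_cast
    ring

theorem pv_rowsRev_eq : ∀ (n : Nat) (vs : List Int),
    pvRowsRev n vs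
    = ((List.range n).map (fun (j : Nat) => pvRowLine (vs.map (fun v => v - ((n : Int) - 1 - (j : Int)))))).flatMap
        (fun r => r ++ ['\n']) := by
  intro n
  induction n with
  | zero => intro vs; simp [pvRowsRev]
  | succ n ih =>
    intro vs
    rw [List.range_succ]
    simp only [pvRowsRev, List.map_append, List.flatMap_append, List.map_cons, List.map_nil,
      List.flatMap_cons, List.flatMap_nil]
    rw [ih]
    congr 1
    · congr 1
      apply List.map_congr_left
      intro j hj
      rw [List.map_map]
      apply congrArg pvRowLine
      apply List.map_congr_left
      intro v _
      simp only [Function.comp_apply]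
      push_cast
      ring
    · simp only [List.append_nil]
      congr 1
      have : vs.map (fun v => v - ((n + 1 : Nat) - 1 - (n : Nat) : Int)) = vs := by
        simp
      rw [this]

theorem pv_join_snoc (rows : List (List Char)) (last : List Char) :
    PySem.Chars.join ['\n'] (rows ++ [last]) = rows.flatMap (fun r => r ++ ['\n']) ++ last := by
  induction rows with
  | nil => simp [PySem.Chars.join_singleton]
  | cons r rest ih =>
    cases rest with
    | nil =>
      simp only [List.nil_append, List.cons_append]
      rw [PySem.Chars.join_cons_cons ['\n'] r last [], PySem.Chars.join_singleton]
      simp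
    | cons r2 rest2 =>
      simp only [List.cons_append] at ih ⊢
      rw [PySem.Chars.join_cons_cons ['\n'] r r2 (rest2 ++ [last]), ih]
      simp

-- A's whole rendering, as top-down rows over the sorted keys of a nodup-keyed dict
theorem pv_render (d : PySem.Dict Char Int) (h : d.keys.Nodup) :
    String.ofList
      (((PySem.List.pyRange 0
          (match PySem.List.max? d.keys (fun k => d.getD k 0) with
           | some k => d.getD k 0
           | none => 0) 1).foldl
        (fun (st : List Char × List Int) _i =>
          (pvRstripSp (PySem.Chars.join [' '] (st.2.map (fun v => if v > 0 then ['*'] else [' ']))) ++ '\n' :: st.1,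
           st.2.map (fun v => v - 1)))
        ([], (PySem.List.sorted d.keys (fun k => k) false).map (fun k => d.getD k 0))).1
        ++ PySem.Chars.join [' '] ((PySem.List.sorted d.keys (fun k => k) false).map (fun k => [k])))
    = String.ofList (PySem.Chars.join ['\n']
        ((PySem.List.pyRange 0 (PySem.List.maxD d.values (fun v => v) 0) 1).map (fun r =>
          pvRstripSp (PySem.Chars.join [' ']
            ((PySem.List.sorted d.keys (fun k => k) false).map
              (fun k => if d.getD k 0 > PySem.List.maxD d.values (fun v => v) 0 - 1 - r then ['*'] else [' ']))))
          ++ [PySem.Chars.join [' '] ((PySem.List.sorted d.keys (fun k => k) false).map (fun k => [k]))])) := by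
  rw [pv_max_eq d h]
  set K := PySem.List.sorted d.keys (fun k => k) false with hK
  set m := PySem.List.maxD d.values (fun v => v) 0 with hm
  set vs := K.map (fun k => d.getD k 0) with hvs
  rw [pv_fold_rows, pv_join_snoc]
  congr 1
  rw [PySem.List.length_pyRange_one]
  simp only [List.append_nil, Int.sub_zero]
  rw [pv_rowsRev_eq, PySem.List.pyRange_one, List.map_map]
  simp only [Int.sub_zero]
  congr 1
  apply congrArg (List.flatMap (fun r => r ++ ['\n']))
  apply List.map_congr_left
  intro j hj
  have hj' : j < m.toNat := by simpa using hj
  have hmn : ((m.toNat : Nat) : Int) = m := by omega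
  simp only [Function.comp_apply]
  unfold pvRowLine
  rw [hvs, List.map_map]
  congr 1
  rw [List.map_map]
  apply congrArg (PySem.Chars.join [' '])
  apply List.map_congr_left
  intro k _
  simp only [Function.comp_apply]
  rw [hmn]
  have hiff : (d.getD k 0 - (m - 1 - (j : Int)) > 0) ↔ (d.getD k 0 > m - 1 - (0 + (j : Int))) := by
    omega
  exact if_congr hiff rfl rfl

-- ---------- B-side lemmas ----------

theorem pv_filter_eq (cs : List Char) :
    cs.filter (fun ch => decide ('A' ≤ ch ∧ ch ≤ 'Z'))
    = cs.filter (fun c => decide (c ∈ pvAbc)) := by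
  apply List.filter_congr
  intro x _
  simp [pv_mem_abc_iff]

theorem pv_ofList_snoc (l : List Char) (c : Char) :
    PySem.Set.ofList (l ++ [c])
    = if c ∈ PySem.Set.ofList l then PySem.Set.ofList l else PySem.Set.ofList l ++ [c] := by
  rw [PySem.Set.ofList_eq_foldl, List.foldl_append, ← PySem.Set.ofList_eq_foldl]
  simp only [List.foldl_cons, List.foldl_nil]
  unfold PySem.Set.add
  by_cases hm : c ∈ PySem.Set.ofList l
  · simp [PySem.Set.contains, hm]
  · simp [PySem.Set.contains, hm]

theorem pv_ofList_sublist (l : List Char) : List.Sublist (PySem.Set.ofList l : List Char) l := by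
  induction l using List.reverseRecOn with
  | nil => simp [PySem.Set.ofList, PySem.Set.empty]
  | append_singleton l c ih =>
    rw [pv_ofList_snoc]
    by_cases hm : c ∈ PySem.Set.ofList l
    · rw [if_pos hm]
      exact ih.trans (List.sublist_append_left l [c])
    · rw [if_neg hm]
      exact List.Sublist.append ih (List.Sublist.refl [c])

theorem pv_incLast_map (D : List Char) (f : Char → Int) (c : Char)
    (hn : D.Nodup) (hl : D.getLast? = some c) :
    pvIncLast (D.map f) = D.map (fun k => if k = c then f k + 1 else f k) := by
  induction D with
  | nil => simp at hl
  | cons x t ih =>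
    cases t with
    | nil =>
      simp only [List.getLast?_singleton, Option.some.injEq] at hl
      subst hl
      simp [pvIncLast]
    | cons y u =>
      have hl' : (y :: u).getLast? = some c := by
        rw [List.getLast?_cons_cons] at hl
        exact hl
      have hcmem : c ∈ y :: u := List.mem_of_getLast? hl'
      have hx : x ≠ c := by
        intro hxc
        exact (List.nodup_cons.1 hn).1 (hxc ▸ hcmem)
      have step : pvIncLast (f x :: (y :: u).map f) = f x :: pvIncLast ((y :: u).map f) := by
        simp [pvIncLast]
      simp only [List.map_cons] at step ⊢
      rw [step, show f y :: List.map f u = List.map f (y :: u) from rfl,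
        ih (List.nodup_cons.1 hn).2 hl']
      simp [hx]

-- the last element of a ≤-sorted list bounds every element
theorem pv_last_ge (D : List Char) (hp : D.Pairwise (· ≤ ·)) :
    ∀ y, D.getLast? = some y → ∀ x ∈ D, x ≤ y := by
  induction D with
  | nil => intro y hy; simp at hy
  | cons a t ih =>
    intro y hy x hx
    cases t with
    | nil =>
      simp only [List.getLast?_singleton, Option.some.injEq] at hy
      subst hy
      simp only [List.mem_singleton] at hx
      exact hx ▸ le_refl _
    | cons b u =>
      rw [List.getLast?_cons_cons] at hy
      have hymem : y ∈ b :: u := List.mem_of_getLast? hy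
      rcases List.mem_cons.1 hx with rfl | hx'
      · exact (List.pairwise_cons.1 hp).1 y hymem
      · exact ih (List.pairwise_cons.1 hp).2 y hy x hx'

-- the group fold over a sorted list = (first occurrences, multiplicities)
theorem pv_group (l : List Char) (h : l.Pairwise (· ≤ ·)) :
    l.foldl
      (fun (st : List Char × List Int) ch =>
        if st.1 ≠ [] ∧ st.1.getLast? = some ch
        then (st.1, pvIncLast st.2)
        else (st.1 ++ [ch], st.2 ++ [1]))
      ([], [])
    = (PySem.Set.ofList l, (PySem.Set.ofList l).map (fun k => (l.count k : Int))) := by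
  induction l using List.reverseRecOn with
  | nil => rfl
  | append_singleton l c ih =>
    have hl : l.Pairwise (· ≤ ·) := (List.pairwise_append.1 h).1
    have hc : ∀ x ∈ l, x ≤ c := by
      intro x hx
      exact (List.pairwise_append.1 h).2.2 x hx c (by simp)
    rw [List.foldl_append, ih hl]
    simp only [List.foldl_cons, List.foldl_nil]
    have hmemD : ∀ x, x ∈ (PySem.Set.ofList l : List Char) ↔ x ∈ l :=
      fun x => PySem.Set.mem_ofList l x
    have hnD : (PySem.Set.ofList l : List Char).Nodup := PySem.Set.nodup_ofList l
    by_cases hcl : c ∈ l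
    · have hcD : c ∈ (PySem.Set.ofList l : List Char) := (hmemD c).2 hcl
      have hDne : (PySem.Set.ofList l : List Char) ≠ [] := List.ne_nil_of_mem hcD
      have hpD : (PySem.Set.ofList l : List Char).Pairwise (· ≤ ·) :=
        List.Pairwise.sublist (pv_ofList_sublist l) hl
      have hlast : (PySem.Set.ofList l : List Char).getLast? = some c := by
        cases hy : (PySem.Set.ofList l : List Char).getLast? with
        | none => exact absurd (List.getLast?_eq_none_iff.1 hy) hDne
        | some y =>
          have hyD : y ∈ (PySem.Set.ofList l : List Char) := List.mem_of_getLast? hy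
          have h1 : y ≤ c := hc y ((hmemD y).1 hyD)
          have h2 : c ≤ y := pv_last_ge _ hpD y hy c hcD
          rw [le_antisymm h1 h2]
      rw [if_pos ⟨hDne, hlast⟩, pv_ofList_snoc, if_pos hcD]
      refine Prod.ext rfl ?_
      show pvIncLast _ = _
      rw [pv_incLast_map _ _ c hnD hlast]
      apply List.map_congr_left
      intro k _
      by_cases hkc : k = c
      · subst hkc
        have h1 : List.count k (l ++ [k]) = List.count k l + 1 := by
          rw [List.count_append]
          simp
        rw [if_pos rfl, h1]
        push_cast
        ring
      · have h2 : List.count k (l ++ [c]) = List.count k l := by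
          rw [List.count_append]
          have h0 : List.count k [c] = 0 := List.count_eq_zero.2 (by simp [hkc])
          omega
        rw [if_neg hkc, h2]
    · rw [if_neg (by
        rintro ⟨_, hlast⟩
        exact hcl ((hmemD c).1 (List.mem_of_getLast? hlast)))]
      rw [pv_ofList_snoc, if_neg (fun hx => hcl ((hmemD c).1 hx))]
      refine Prod.ext rfl ?_
      show _ ++ [(1 : Int)] = _
      rw [List.map_append]
      congr 1
      · apply List.map_congr_left
        intro k hk
        have hkc : k ≠ c := fun hkc => hcl (hkc ▸ (hmemD k).1 hk)
        have h2 : List.count k (l ++ [c]) = List.count k l := by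
          rw [List.count_append]
          have h0 : List.count k [c] = 0 := List.count_eq_zero.2 (by simp [hkc])
          omega
        rw [h2]
      · have h3 : List.count c (l ++ [c]) = 1 := by
          rw [List.count_append]
          have h0 : List.count c l = 0 := List.count_eq_zero_of_not_mem hcl
          simp [h0]
        simp only [List.map_cons, List.map_nil, h3]
        norm_num

theorem pv_sorted_ofList_comm (l : List Char) :
    PySem.Set.ofList (PySem.List.sorted l (fun k => k) false)
    = PySem.List.sorted (PySem.Set.ofList l : List Char) (fun k => k) false := by
  symm
  apply PySem.List.sorted_eq_of_perm_of_pairwise_lt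
  · apply (List.perm_ext_iff_of_nodup (PySem.Set.nodup_ofList _) (PySem.Set.nodup_ofList _)).2
    intro a
    rw [PySem.Set.mem_ofList, PySem.Set.mem_ofList, PySem.List.mem_sorted]
  · have hle : (PySem.Set.ofList (PySem.List.sorted l (fun k => k) false) : List Char).Pairwise (· ≤ ·) :=
      List.Pairwise.sublist (pv_ofList_sublist _) (PySem.List.sorted_pairwise l (fun k => k))
    have hnd : (PySem.Set.ofList (PySem.List.sorted l (fun k => k) false) : List Char).Nodup :=
      PySem.Set.nodup_ofList _
    exact (hle.and hnd).imp (fun h => lt_of_le_of_ne h.1 h.2)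

theorem pv_maxD_perm (l₁ l₂ : List Int) (h : l₁.Perm l₂) :
    PySem.List.maxD l₁ (fun v => v) 0 = PySem.List.maxD l₂ (fun v => v) 0 := by
  unfold PySem.List.maxD
  cases h1 : PySem.List.max? l₁ (fun v => v) with
  | none =>
    have : l₁ = [] := (PySem.List.max?_eq_none_iff _ _).1 h1
    have : l₂ = [] := (h.symm.trans (this ▸ List.Perm.refl _)).eq_nil
    rw [(PySem.List.max?_eq_none_iff l₂ _).2 this]
  | some m =>
    cases h2 : PySem.List.max? l₂ (fun v => v) with
    | none =>
      have h2' : l₂ = [] := (PySem.List.max?_eq_none_iff _ _).1 h2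
      have : l₁ = [] := (h.trans (h2' ▸ List.Perm.refl _)).eq_nil
      rw [this] at h1
      simp [PySem.List.max?] at h1
    | some m' =>
      simp only [Option.getD_some]
      have hm1 : m ∈ l₁ := PySem.List.max?_mem h1
      have hm2 : m' ∈ l₂ := PySem.List.max?_mem h2
      exact le_antisymm (PySem.List.max?_isMax h2 m (h.mem_iff.1 hm1))
        (PySem.List.max?_isMax h1 m' (h.mem_iff.2 hm2))

theorem pv_zip_eq (n : Nat) : ∀ (cols : List (List Char)), cols ≠ [] →
    (∀ l ∈ cols, l.length = n) →
    pvZip cols = (List.range n).map (fun r => cols.map (fun l => l.getD r ' ')) := by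
  induction n with
  | zero =>
    intro cols hne hlen
    rw [pvZip]
    have : cols.any (fun l => l.isEmpty) = true := by
      cases cols with
      | nil => exact absurd rfl hne
      | cons c t =>
        have := hlen c (by simp)
        simp [List.eq_nil_of_length_eq_zero this]
    simp [this]
  | succ n ih =>
    intro cols hne hlen
    have hnonempty : ∀ l ∈ cols, l ≠ [] := by
      intro l hl hnil
      have := hlen l hl
      rw [hnil] at this
      simp at this
    rw [pvZip]
    rw [if_neg (by
      simp only [Bool.or_eq_true, List.isEmpty_iff, List.any_eq_true, not_or, not_exists, not_and]
      exact ⟨hne, fun l hl => by simpa [List.isEmpty_iff] using hnonempty l hl⟩)]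
    rw [List.range_succ_eq_map, List.map_cons]
    congr 1
    · apply List.map_congr_left
      intro l hl
      have hne' := hnonempty l hl
      cases l with
      | nil => exact absurd rfl hne'
      | cons a t => rfl
    · rw [ih (cols.map (fun l => l.tail)) (by simpa using hne)
        (by
          intro l hl
          obtain ⟨l', hl', rfl⟩ := List.mem_map.1 hl
          have := hlen l' hl'
          simp [List.length_tail, this])]
      rw [List.map_map]
      apply List.map_congr_left
      intro r _
      simp only [Function.comp_apply, List.map_map]
      apply List.map_congr_left
      intro l _
      simp only [Function.comp_apply]
      cases l with
      | nil => rfl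
      | cons a t => simp [Nat.succ_eq_add_one]

theorem pv_col_getD (m c : Int) (r : Nat) (h0 : 0 ≤ c) (hm : c ≤ m) (hr : r < m.toNat) :
    (PySem.List.pyRepeat [' '] (m - c) ++ PySem.List.pyRepeat ['*'] c).getD r ' '
    = if c > m - 1 - (r : Int) then '*' else ' ' := by
  rw [PySem.List.pyRepeat_singleton, PySem.List.pyRepeat_singleton]
  by_cases hlt : r < (m - c).toNat
  · rw [List.getD_append _ _ _ _ (by simpa using hlt)]
    rw [List.getD_replicate _ hlt]
    rw [if_neg (by omega)]
  · rw [List.getD_append_right _ _ _ _ (by simpa using hlt)]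
    rw [List.length_replicate] at *
    rw [List.getD_replicate _ (by omega)]
    rw [if_pos (by omega)]

-- B's transpose rendering = direct top-down rows
theorem pv_alt_rows (C : List Int) (m : Int)
    (hm : m = PySem.List.maxD C (fun v => v) 0) (hpos : ∀ c ∈ C, 0 < c) :
    (pvZip (C.map (fun c =>
        PySem.List.pyRepeat [' '] (m - c) ++ PySem.List.pyRepeat ['*'] c))).map
      (fun row => pvRstripSp (PySem.Chars.join [' '] (row.map (fun c => [c]))))
    = (PySem.List.pyRange 0 m 1).map (fun r =>
        pvRstripSp (PySem.Chars.join [' ']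
          (C.map (fun c => if c > m - 1 - r then ['*'] else [' '])))) := by
  have hle : ∀ c ∈ C, c ≤ m := by
    intro c hc
    cases hmax : PySem.List.max? C (fun v => v) with
    | none =>
      rw [(PySem.List.max?_eq_none_iff _ _).1 hmax] at hc
      simp at hc
    | some m0 =>
      have hmm : m = m0 := by
        rw [hm]
        unfold PySem.List.maxD
        rw [hmax]
        rfl
      exact hmm ▸ PySem.List.max?_isMax hmax c hc
  by_cases hC : C = []
  · have hm0 : m = 0 := by rw [hm, hC]; rfl
    subst hm0 hC
    rw [pvZip]
    simp
  · have hCne : C.map (fun c =>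
        PySem.List.pyRepeat [' '] (m - c) ++ PySem.List.pyRepeat ['*'] c) ≠ [] := by
      simpa using hC
    have hlen : ∀ l ∈ C.map (fun c =>
        PySem.List.pyRepeat [' '] (m - c) ++ PySem.List.pyRepeat ['*'] c),
        l.length = m.toNat := by
      intro l hl
      obtain ⟨c, hc, rfl⟩ := List.mem_map.1 hl
      rw [List.length_append, PySem.List.pyRepeat_singleton, PySem.List.pyRepeat_singleton,
        List.length_replicate, List.length_replicate]
      have h1 := hpos c hc
      have h2 := hle c hc
      omega
    rw [pv_zip_eq m.toNat _ hCne hlen, PySem.List.pyRange_one]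
    simp only [Int.sub_zero]
    rw [List.map_map, List.map_map]
    apply List.map_congr_left
    intro r hr
    have hrlt : r < m.toNat := List.mem_range.1 hr
    simp only [Function.comp_apply]
    apply congrArg pvRstripSp
    apply congrArg (PySem.Chars.join [' '])
    rw [List.map_map, List.map_map]
    apply List.map_congr_left
    intro c hc
    simp only [Function.comp_apply]
    rw [pv_col_getD m c r (le_of_lt (hpos c hc)) (hle c hc) hrlt]
    rw [apply_ite (fun x => [x])]
    exact if_congr (by omega) rfl rfl

-- ===== VERDICT (by name: the statement is the Claim_ definition above) =====
theorem vertical_histogram_of_spec : Claim_equal_vertical_histogram_of := by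
  intro s _
  unfold Spec_vertical_histogram_of
  show vertical_histogram_of s = vertical_histogram_of_alt s
  unfold vertical_histogram_of vertical_histogram_of_alt
  simp only []
  rw [pv_dictA s.toList, pv_dict_eq_counter s.toList]
  rw [pv_render _ (PySem.Dict.nodup_keys_counter _)]
  rw [pv_filter_eq s.toList]
  rw [pv_group _ (by
    have := PySem.List.sorted_pairwise (s.toList.filter (fun c => decide (c ∈ pvAbc))) (fun k => k)
    simpa using this)]
  dsimp only
  rw [PySem.Dict.keys_counter]
  rw [pv_sorted_ofList_comm]
  have hcnt : ∀ k : Char, ((List.count k (PySem.List.sorted (List.filter (fun c => decide (c ∈ pvAbc)) s.toList) (fun c => c) false)) : Int)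
      = ((List.count k (List.filter (fun c => decide (c ∈ pvAbc)) s.toList)) : Int) := by
    intro k
    have := (PySem.List.sorted_perm (List.filter (fun c => decide (c ∈ pvAbc)) s.toList) (fun c => c) false).count_eq k
    exact_mod_cast this
  simp only [hcnt]
  rw [PySem.Dict.values_eq_map_keys _ (PySem.Dict.nodup_keys_counter _) 0,
    PySem.Dict.keys_counter]
  simp only [PySem.Dict.getD_counter]
  have hmEq : PySem.List.maxD
      (List.map (fun k => ((List.count k (List.filter (fun c => decide (c ∈ pvAbc)) s.toList)) : Int))
        (PySem.List.sorted (PySem.Set.ofList (List.filter (fun c => decide (c ∈ pvAbc)) s.toList) : List Char) (fun k => k) false))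
      (fun v => v) 0
      = PySem.List.maxD
      (List.map (fun k => ((List.count k (List.filter (fun c => decide (c ∈ pvAbc)) s.toList)) : Int))
        (PySem.Set.ofList (List.filter (fun c => decide (c ∈ pvAbc)) s.toList) : List Char))
      (fun v => v) 0 :=
    pv_maxD_perm _ _ ((PySem.List.sorted_perm _ _ _).map _)
  rw [hmEq]
  rw [pv_alt_rows _ _ hmEq.symm (by
    intro c hc
    obtain ⟨k, hk, rfl⟩ := List.mem_map.1 hc
    have hk2 : k ∈ List.filter (fun c => decide (c ∈ pvAbc)) s.toList := by
      rw [PySem.List.mem_sorted, PySem.Set.mem_ofList] at hk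
      exact hk
    exact_mod_cast List.count_pos_iff.2 hk2)]
  simp only [List.map_map, Function.comp_def]
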